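-- pv_equiv track=rewrite | github.com/alizademhdi/Pentago | Player.py | calculate_value_in_line
-- ===== SOURCE A (Python) =====
-- def calculate_value_in_line(line, piece):
--     opposite_piece = 1 if piece == 2 else 2
--
--     empty = line.count(0)
--     own = line.count(piece)
--     opposite = line.count(opposite_piece)
--
--     count_4 = 0
--     for i in range(len(line)-3):
--         if line[i] == line[i+1] == line[i+2] == line[i+3] == piece:
--             count_4 += 1
--
--     if count_4 > 0 and empty >= 1:
--         return 10000
--
--     if own == 4 and empty >= 1:
--         return 1000
--
--     if opposite == 4 and empty >= 1:
--         return -5000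
--
--     value = 0
--     count_3 = 0
--     for i in range(len(line)-2):
--         if line[i] == line[i+1] == line[i+2] == piece:
--             count_3 += 1
--     if count_3 > 0 and empty >= 2:
--         value += 50
--
--     if opposite >=3:
--         value -= 30
--
--     count_2 = 0
--     for i in range(len(line)-1):
--         if line[i] == line[i+1] == piece:
--             count_2 += 1
--     if count_2 > 0 and empty >= 3:
--         value += 30
--
--     return value
-- ===== SOURCE B (Python) =====
-- def calculate_value_in_line(line, piece):
--     opposite_piece = 1 if piece == 2 else 2
--
--     empty = line.count(0)
--     own = line.count(piece)
--     opposite = line.count(opposite_piece)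
--
--     # single pass: longest consecutive run of `piece`
--     run = 0
--     max_run = 0
--     for x in line:
--         if x == piece:
--             run += 1
--             if run > max_run:
--                 max_run = run
--         else:
--             run = 0
--
--     if max_run >= 4 and empty >= 1:
--         return 10000
--
--     if own == 4 and empty >= 1:
--         return 1000
--
--     if opposite == 4 and empty >= 1:
--         return -5000
--
--     value = 0
--     if max_run >= 3 and empty >= 2:
--         value += 50
--
--     if opposite >= 3:
--         value -= 30
--
--     if max_run >= 2 and empty >= 3:
--         value += 30
--
--     return value
-- ===== Notes on version B (the rewrite author's own statement) =====
-- stated objective: simpler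
-- what changed: The three separate sliding-window count loops (windows of 4, 3, 2) are replaced by one pass that maintains the current and maximal consecutive run of `piece`; `max_run >= k` substitutes each `count_k > 0` test in the unchanged branch structure.
import Mathlib
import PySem

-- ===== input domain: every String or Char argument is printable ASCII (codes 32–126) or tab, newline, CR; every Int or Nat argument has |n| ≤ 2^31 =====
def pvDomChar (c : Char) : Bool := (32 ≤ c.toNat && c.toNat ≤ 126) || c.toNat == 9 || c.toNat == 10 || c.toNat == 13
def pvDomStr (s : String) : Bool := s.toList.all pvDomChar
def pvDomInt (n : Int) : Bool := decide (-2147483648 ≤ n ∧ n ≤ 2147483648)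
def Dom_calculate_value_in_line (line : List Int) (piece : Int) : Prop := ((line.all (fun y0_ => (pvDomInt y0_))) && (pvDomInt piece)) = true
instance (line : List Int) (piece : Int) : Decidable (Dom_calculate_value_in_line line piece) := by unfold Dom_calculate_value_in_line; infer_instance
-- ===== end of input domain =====

-- B replaces A's three sliding-window count loops by a single pass maintaining the current and maximal
-- consecutive run of `piece` (objective: simpler). Equivalence is proved on all inputs (A is total).

-- ===== PORT A =====
-- indices in the three loops are always in range (i < len-3, len-2, len-1), so pyGetD is exact here
def calculate_value_in_line (line : List Int) (piece : Int) : Int :=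
  let opposite_piece : Int := if piece = 2 then 1 else 2
  let empty := PySem.List.count line 0
  let own := PySem.List.count line piece
  let opposite := PySem.List.count line opposite_piece
  let count_4 : Int := (PySem.List.pyRange 0 ((line.length : Int) - 3) 1).foldl
    (fun c i =>
      if PySem.List.pyGetD line i 0 = PySem.List.pyGetD line (i+1) 0 ∧
         PySem.List.pyGetD line (i+1) 0 = PySem.List.pyGetD line (i+2) 0 ∧
         PySem.List.pyGetD line (i+2) 0 = PySem.List.pyGetD line (i+3) 0 ∧
         PySem.List.pyGetD line (i+3) 0 = piece
      then c + 1 else c) 0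
  if count_4 > 0 ∧ empty ≥ 1 then 10000
  else if own = 4 ∧ empty ≥ 1 then 1000
  else if opposite = 4 ∧ empty ≥ 1 then -5000
  else
    let value : Int := 0
    let count_3 : Int := (PySem.List.pyRange 0 ((line.length : Int) - 2) 1).foldl
      (fun c i =>
        if PySem.List.pyGetD line i 0 = PySem.List.pyGetD line (i+1) 0 ∧
           PySem.List.pyGetD line (i+1) 0 = PySem.List.pyGetD line (i+2) 0 ∧
           PySem.List.pyGetD line (i+2) 0 = piece
        then c + 1 else c) 0
    let value := if count_3 > 0 ∧ empty ≥ 2 then value + 50 else value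
    let value := if opposite ≥ 3 then value - 30 else value
    let count_2 : Int := (PySem.List.pyRange 0 ((line.length : Int) - 1) 1).foldl
      (fun c i =>
        if PySem.List.pyGetD line i 0 = PySem.List.pyGetD line (i+1) 0 ∧
           PySem.List.pyGetD line (i+1) 0 = piece
        then c + 1 else c) 0
    let value := if count_2 > 0 ∧ empty ≥ 3 then value + 30 else value
    value

-- ===== PORT B =====
def calculate_value_in_line_alt (line : List Int) (piece : Int) : Int :=
  let opposite_piece : Int := if piece = 2 then 1 else 2
  let empty := PySem.List.count line 0
  let own := PySem.List.count line piece
  let opposite := PySem.List.count line opposite_piece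
  -- single pass: (current run, max run)
  let rm := line.foldl (fun (p : Int × Int) x =>
      if x = piece then (p.1 + 1, if p.1 + 1 > p.2 then p.1 + 1 else p.2)
      else (0, p.2)) ((0 : Int), (0 : Int))
  let max_run := rm.2
  if max_run ≥ 4 ∧ empty ≥ 1 then 10000
  else if own = 4 ∧ empty ≥ 1 then 1000
  else if opposite = 4 ∧ empty ≥ 1 then -5000
  else
    let value : Int := 0
    let value := if max_run ≥ 3 ∧ empty ≥ 2 then value + 50 else value
    let value := if opposite ≥ 3 then value - 30 else value
    let value := if max_run ≥ 2 ∧ empty ≥ 3 then value + 30 else value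
    value

-- ===== PRECONDITION & SPEC =====
def Spec_calculate_value_in_line (line : List Int) (piece : Int) (out : Int) : Prop := out = calculate_value_in_line_alt line piece
instance (line : List Int) (piece : Int) (out : Int) : Decidable (Spec_calculate_value_in_line line piece out) := by unfold Spec_calculate_value_in_line; infer_instance

-- ===== CLAIM (what is proved, stated in full; the proofs are below) =====
def Claim_equal_calculate_value_in_line : Prop := ∀ (line : List Int) (piece : Int), Dom_calculate_value_in_line line piece → Spec_calculate_value_in_line line piece (calculate_value_in_line line piece)

-- ===== LEMMAS AND PROOFS =====

-- max run, carrying the length r of the run currently open (proof-side characterisation of B's fold)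
def pvMj (piece : Int) : Int → List Int → Int
  | r, [] => r
  | r, x :: t => if x = piece then pvMj piece (r+1) t else max r (pvMj piece 0 t)

-- length of the leading run of `piece`
def pvLead (piece : Int) : List Int → Int
  | [] => 0
  | x :: t => if x = piece then pvLead piece t + 1 else 0

lemma pvMj_le (piece r : Int) (l : List Int) : r ≤ pvMj piece r l := by
  induction l generalizing r with
  | nil => simp [pvMj]
  | cons x t ih =>
    simp only [pvMj]
    split
    · exact le_trans (by omega) (ih (r+1))
    · exact le_max_left _ _

lemma pvLead_nonneg (piece : Int) (l : List Int) : 0 ≤ pvLead piece l := by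
  induction l with
  | nil => simp [pvLead]
  | cons x t ih => simp only [pvLead]; split <;> omega

lemma pvMj_split (piece : Int) (l : List Int) : ∀ r : Int, 0 ≤ r →
    pvMj piece r l = max (r + pvLead piece l) (pvMj piece 0 l) := by
  induction l with
  | nil => intro r hr; simp [pvMj, pvLead]; omega
  | cons x t ih =>
    intro r hr
    simp only [pvMj, pvLead]
    split
    · rw [ih (r+1) (by omega), ih (0+1) (by omega)]
      have := pvLead_nonneg piece t
      have := pvMj_le piece 0 t
      omega
    · have := pvMj_le piece 0 t
      omega

lemma pvFold_rm (piece : Int) (l : List Int) : ∀ r b : Int, 0 ≤ r → r ≤ b →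
    (l.foldl (fun (p : Int × Int) x =>
      if x = piece then (p.1 + 1, if p.1 + 1 > p.2 then p.1 + 1 else p.2)
      else (0, p.2)) (r, b)).2 = max b (pvMj piece r l) := by
  induction l with
  | nil => intro r b h1 h2; simp [pvMj]; omega
  | cons x t ih =>
    intro r b h1 h2
    simp only [List.foldl_cons, pvMj]
    by_cases hx : x = piece
    · rw [if_pos hx, if_pos hx]
      rw [ih (r+1) (if r + 1 > b then r + 1 else b) (by omega) (by split <;> omega)]
      have h3 := pvMj_le piece (r+1) t
      split <;> omega
    · simp only [if_neg hx]
      rw [ih 0 b (by omega) (by omega)]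
      have h3 := pvMj_le piece 0 t
      omega

-- k ≤ leading run  ↔  the first k elements exist and equal piece
lemma pvLead_iff (piece : Int) (l : List Int) : ∀ k : Nat,
    (k ≤ l.length ∧ ∀ j < k, l[j]? = some piece) ↔ (k : Int) ≤ pvLead piece l := by
  induction l with
  | nil =>
    intro k
    simp [pvLead]
    intro hk
    omega
  | cons x t ih =>
    intro k
    cases k with
    | zero => simp [pvLead_nonneg]
    | succ m =>
      simp only [pvLead]
      by_cases hx : x = piece
      · subst hx
        rw [if_pos rfl]
        constructor
        · rintro ⟨hlen, hall⟩
          have : (m : Int) ≤ pvLead x t := by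
            rw [← ih m]
            refine ⟨by simpa using hlen, fun j hj => ?_⟩
            have := hall (j+1) (by omega)
            simpa using this
          omega
        · intro h
          have hm : (m : Int) ≤ pvLead x t := by omega
          rw [← ih m] at hm
          refine ⟨by simp; omega, fun j hj => ?_⟩
          cases j with
          | zero => simp
          | succ i => simpa using hm.2 i (by omega)
      · rw [if_neg hx]
        constructor
        · rintro ⟨hlen, hall⟩
          have := hall 0 (by omega)
          simp at this
          exact absurd this hx
        · intro h; omega

-- k ≤ max run  ↔  some window of k consecutive elements all equal piece
lemma pvWindow_iff (piece : Int) (k : Nat) (hk : 1 ≤ k) (l : List Int) :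
    (∃ n : Nat, n + k ≤ l.length ∧ ∀ j < k, l[n + j]? = some piece) ↔
    (k : Int) ≤ pvMj piece 0 l := by
  induction l with
  | nil =>
    simp only [pvMj, List.length_nil]
    constructor
    · rintro ⟨n, hn, -⟩; omega
    · intro h; omega
  | cons x t ih =>
    constructor
    · rintro ⟨n, hn, hall⟩
      cases n with
      | zero =>
        have : (k : Int) ≤ pvLead piece (x :: t) := by
          rw [← pvLead_iff]
          exact ⟨by simpa using hn, by simpa using hall⟩
        simp only [pvMj]
        by_cases hx : x = piece
        · rw [if_pos hx, pvMj_split piece t (0+1) (by omega)]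
          simp only [pvLead, if_pos hx] at this
          omega
        · simp only [pvLead, if_neg hx] at this
          omega
      | succ m =>
        have : (k : Int) ≤ pvMj piece 0 t := by
          rw [← ih]
          refine ⟨m, by simp only [List.length_cons] at hn; omega, fun j hj => ?_⟩
          have := hall j hj
          simpa [Nat.succ_add] using this
        simp only [pvMj]
        split
        · rw [pvMj_split piece t (0+1) (by omega)]; omega
        · have := pvMj_le piece 0 t; omega
    · intro h
      simp only [pvMj] at h
      by_cases hx : x = piece
      · rw [if_pos hx, pvMj_split piece t (0+1) (by omega)] at h
        rcases le_or_gt (k : Int) (pvMj piece 0 t) with h2 | h2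
        · obtain ⟨n, hn, hall⟩ := ih.mpr h2
          exact ⟨n+1, by simp; omega, fun j hj => by simpa [Nat.succ_add] using hall j hj⟩
        · have hlead : (k : Int) ≤ pvLead piece (x :: t) := by
            simp only [pvLead, if_pos hx]; omega
          rw [← pvLead_iff] at hlead
          exact ⟨0, by simpa using hlead.1, by simpa using hlead.2⟩
      · rw [if_neg hx] at h
        have h2 : (k : Int) ≤ pvMj piece 0 t := by omega
        obtain ⟨n, hn, hall⟩ := ih.mpr h2
        exact ⟨n+1, by simp; omega, fun j hj => by simpa [Nat.succ_add] using hall j hj⟩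

-- pyGetD at an in-range Nat index is getElem
lemma pvIdx (l : List Int) (j : Nat) (h : j < l.length) :
    PySem.List.pyGetD l (j : Int) 0 = l[j] := by
  rw [PySem.List.pyGetD_natCast, List.getD_eq_getElem _ _ h]

-- positivity of A's conditional-count fold over a range = existence of an index satisfying the test
lemma pvCountPos (P : Int → Prop) [DecidablePred P] (m : Int) :
    ((0:Int) < (PySem.List.pyRange 0 m 1).foldl (fun (c : Int) i => if P i then c + 1 else c) 0) ↔
    ∃ i, (0 ≤ i ∧ i < m) ∧ P i := by
  rw [PySem.List.foldl_ite_add_one]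
  simp [List.countP_pos_iff, PySem.List.mem_pyRange_one]

lemma pvWin4 (line : List Int) (piece : Int) :
    (∃ i, (0 ≤ i ∧ i < (line.length : Int) - 3) ∧
      (PySem.List.pyGetD line i 0 = PySem.List.pyGetD line (i+1) 0 ∧
       PySem.List.pyGetD line (i+1) 0 = PySem.List.pyGetD line (i+2) 0 ∧
       PySem.List.pyGetD line (i+2) 0 = PySem.List.pyGetD line (i+3) 0 ∧
       PySem.List.pyGetD line (i+3) 0 = piece)) ↔ (4:Int) ≤ pvMj piece 0 line := by
  have base := pvWindow_iff piece 4 (by omega) line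
  simp only [Nat.cast_ofNat] at base
  rw [← base]
  constructor
  · rintro ⟨i, ⟨h0, h1⟩, hc⟩
    obtain ⟨n, rfl⟩ : ∃ n : Nat, i = (n:Int) := ⟨i.toNat, (Int.toNat_of_nonneg h0).symm⟩
    have hlen : n + 4 ≤ line.length := by omega
    rw [show ((n:Int)+1) = ((n+1:Nat):Int) by push_cast; ring,
        show ((n:Int)+2) = ((n+2:Nat):Int) by push_cast; ring,
        show ((n:Int)+3) = ((n+3:Nat):Int) by push_cast; ring,
        pvIdx line n (by omega), pvIdx line (n+1) (by omega),
        pvIdx line (n+2) (by omega), pvIdx line (n+3) (by omega)] at hc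
    refine ⟨n, hlen, ?_⟩
    intro j hj
    have e : getElem line (n+j) (by omega) = piece := by
      interval_cases j
      · exact hc.1.trans (hc.2.1.trans (hc.2.2.1.trans hc.2.2.2))
      · exact hc.2.1.trans (hc.2.2.1.trans hc.2.2.2)
      · exact hc.2.2.1.trans hc.2.2.2
      · exact hc.2.2.2
    rw [List.getElem?_eq_getElem (by omega)]
    exact congrArg some e
  · rintro ⟨n, hlen, hall⟩
    have e : ∀ j (_ : j < 4), getElem line (n+j) (by omega) = piece := by
      intro j hj
      have := hall j hj
      rwa [List.getElem?_eq_getElem (by omega), Option.some.injEq] at this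
    refine ⟨(n:Int), ⟨by omega, by omega⟩, ?_⟩
    rw [show ((n:Int)+1) = ((n+1:Nat):Int) by push_cast; ring,
        show ((n:Int)+2) = ((n+2:Nat):Int) by push_cast; ring,
        show ((n:Int)+3) = ((n+3:Nat):Int) by push_cast; ring,
        pvIdx line n (by omega), pvIdx line (n+1) (by omega),
        pvIdx line (n+2) (by omega), pvIdx line (n+3) (by omega)]
    have e0 := e 0 (by omega); have e1 := e 1 (by omega)
    have e2 := e 2 (by omega); have e3 := e 3 (by omega)
    exact ⟨e0.trans e1.symm, e1.trans e2.symm, e2.trans e3.symm, e3⟩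

lemma pvWin3 (line : List Int) (piece : Int) :
    (∃ i, (0 ≤ i ∧ i < (line.length : Int) - 2) ∧
      (PySem.List.pyGetD line i 0 = PySem.List.pyGetD line (i+1) 0 ∧
       PySem.List.pyGetD line (i+1) 0 = PySem.List.pyGetD line (i+2) 0 ∧
       PySem.List.pyGetD line (i+2) 0 = piece)) ↔ (3:Int) ≤ pvMj piece 0 line := by
  have base := pvWindow_iff piece 3 (by omega) line
  simp only [Nat.cast_ofNat] at base
  rw [← base]
  constructor
  · rintro ⟨i, ⟨h0, h1⟩, hc⟩
    obtain ⟨n, rfl⟩ : ∃ n : Nat, i = (n:Int) := ⟨i.toNat, (Int.toNat_of_nonneg h0).symm⟩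
    have hlen : n + 3 ≤ line.length := by omega
    rw [show ((n:Int)+1) = ((n+1:Nat):Int) by push_cast; ring,
        show ((n:Int)+2) = ((n+2:Nat):Int) by push_cast; ring,
        pvIdx line n (by omega), pvIdx line (n+1) (by omega),
        pvIdx line (n+2) (by omega)] at hc
    refine ⟨n, hlen, ?_⟩
    intro j hj
    have e : getElem line (n+j) (by omega) = piece := by
      interval_cases j
      · exact hc.1.trans (hc.2.1.trans hc.2.2)
      · exact hc.2.1.trans hc.2.2
      · exact hc.2.2
    rw [List.getElem?_eq_getElem (by omega)]
    exact congrArg some e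
  · rintro ⟨n, hlen, hall⟩
    have e : ∀ j (_ : j < 3), getElem line (n+j) (by omega) = piece := by
      intro j hj
      have := hall j hj
      rwa [List.getElem?_eq_getElem (by omega), Option.some.injEq] at this
    refine ⟨(n:Int), ⟨by omega, by omega⟩, ?_⟩
    rw [show ((n:Int)+1) = ((n+1:Nat):Int) by push_cast; ring,
        show ((n:Int)+2) = ((n+2:Nat):Int) by push_cast; ring,
        pvIdx line n (by omega), pvIdx line (n+1) (by omega),
        pvIdx line (n+2) (by omega)]
    have e0 := e 0 (by omega); have e1 := e 1 (by omega); have e2 := e 2 (by omega)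
    exact ⟨e0.trans e1.symm, e1.trans e2.symm, e2⟩

lemma pvWin2 (line : List Int) (piece : Int) :
    (∃ i, (0 ≤ i ∧ i < (line.length : Int) - 1) ∧
      (PySem.List.pyGetD line i 0 = PySem.List.pyGetD line (i+1) 0 ∧
       PySem.List.pyGetD line (i+1) 0 = piece)) ↔ (2:Int) ≤ pvMj piece 0 line := by
  have base := pvWindow_iff piece 2 (by omega) line
  simp only [Nat.cast_ofNat] at base
  rw [← base]
  constructor
  · rintro ⟨i, ⟨h0, h1⟩, hc⟩
    obtain ⟨n, rfl⟩ : ∃ n : Nat, i = (n:Int) := ⟨i.toNat, (Int.toNat_of_nonneg h0).symm⟩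
    have hlen : n + 2 ≤ line.length := by omega
    rw [show ((n:Int)+1) = ((n+1:Nat):Int) by push_cast; ring,
        pvIdx line n (by omega), pvIdx line (n+1) (by omega)] at hc
    refine ⟨n, hlen, ?_⟩
    intro j hj
    have e : getElem line (n+j) (by omega) = piece := by
      interval_cases j
      · exact hc.1.trans hc.2
      · exact hc.2
    rw [List.getElem?_eq_getElem (by omega)]
    exact congrArg some e
  · rintro ⟨n, hlen, hall⟩
    have e : ∀ j (_ : j < 2), getElem line (n+j) (by omega) = piece := by
      intro j hj
      have := hall j hj
      rwa [List.getElem?_eq_getElem (by omega), Option.some.injEq] at this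
    refine ⟨(n:Int), ⟨by omega, by omega⟩, ?_⟩
    rw [show ((n:Int)+1) = ((n+1:Nat):Int) by push_cast; ring,
        pvIdx line n (by omega), pvIdx line (n+1) (by omega)]
    have e0 := e 0 (by omega); have e1 := e 1 (by omega)
    exact ⟨e0.trans e1.symm, e1⟩

theorem calculate_value_in_line_spec : Claim_equal_calculate_value_in_line := by
  intro line piece _
  unfold Spec_calculate_value_in_line
  simp only [calculate_value_in_line, calculate_value_in_line_alt]
  have hrm : (line.foldl (fun (p : Int × Int) x =>
      if x = piece then (p.1 + 1, if p.1 + 1 > p.2 then p.1 + 1 else p.2)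
      else (0, p.2)) ((0 : Int), (0 : Int))).2 = pvMj piece 0 line := by
    rw [pvFold_rm piece line 0 0 le_rfl le_rfl]
    have := pvMj_le piece 0 line
    omega
  rw [hrm]
  have h4 := (pvCountPos _ ((line.length : Int) - 3)).trans (pvWin4 line piece)
  have h3 := (pvCountPos _ ((line.length : Int) - 2)).trans (pvWin3 line piece)
  have h2 := (pvCountPos _ ((line.length : Int) - 1)).trans (pvWin2 line piece)
  simp only [gt_iff_lt, ge_iff_le, h4, h3, h2]
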